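-- pv_equiv track=rewrite | github.com/gnolp/DSA | ICPC2025 ptit/tinh tong n so tribonacci.py | tribonacci_sum
-- ===== SOURCE A (Python) =====
-- mod = int(1e15 + 7)
--
-- def matrix_mult(a,b):
--     size = len(a)
--     c = [[0] * size for _ in range(size)]
--     for i in range(size):
--         for j in range(size):
--             for k in range(size):
--                 c[i][j] = (c[i][j] + a[i][k] * b[k][j]) % mod
--     return c
--
-- def matrix_power(matrix, n):
--     size = len(matrix)
--     result = [[1 if i == j else 0 for j in range(size)] for i in range(size)]
--     while n > 0:
--         if n % 2 == 1:
--             result = matrix_mult(result, matrix)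
--         matrix = matrix_mult(matrix, matrix)
--         n //= 2
--     return result
--
-- def tribonacci_sum(n):
--     if n == 1:
--         return 1
--     elif n == 2:
--         return 2+1
--     elif n == 3:
--         return 3 + 2 + 1
--     base = [
--         [1, 1, 1, 0], # t(n) = t(n-1) + t(n-2) + t(n-3)
--         [1, 0, 0, 0],
--         [0, 1, 0, 0],
--         [1, 1, 1, 1] # s(N) = s(n-1) + t(n)
--     ]
--     temp = [3, 2, 1, 6]
--     result = matrix_power(base, n - 3)
--     Sn = sum(result[3][i] * temp[i] for i in range(4)) % mod
--     return Sn
-- ===== SOURCE B (Python) =====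
-- mod = int(1e15 + 7)
--
-- def _polmul(u, v, q):
--     # product of u and v as polynomials modulo x^3 - x^2 - x - 1, coefficients mod q
--     u0, u1, u2 = u
--     v0, v1, v2 = v
--     w0 = u0 * v0
--     w1 = u0 * v1 + u1 * v0
--     w2 = u0 * v2 + u1 * v1 + u2 * v0
--     w3 = u1 * v2 + u2 * v1
--     w4 = u2 * v2
--     w3 += w4; w2 += w4; w1 += w4   # x^4 -> x^3 + x^2 + x
--     w2 += w3; w1 += w3; w0 += w3   # x^3 -> x^2 + x + 1
--     return (w0 % q, w1 % q, w2 % q)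
--
-- def tribonacci_sum(n):
--     if n == 1:
--         return 1
--     if n == 2:
--         return 3
--     if n == 3:
--         return 6
--     # work mod 2*mod so the exact identity 2*S(n) = T(n+2) + T(n) - 2 can be halved
--     q = 2 * mod
--     r, b, e = (1, 0, 0), (0, 1, 0), n - 3   # compute x^(n-3) mod (x^3 - x^2 - x - 1)
--     while e > 0:
--         if e % 2 == 1:
--             r = _polmul(r, b, q)
--         b = _polmul(b, b, q)
--         e //= 2
--     a0, a1, a2 = r
--     t_n = (3 * a0 + 6 * a1 + 11 * a2) % q     # T(n)   from seeds T(3),T(4),T(5) = 3,6,11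
--     t_n2 = (11 * a0 + 20 * a1 + 37 * a2) % q  # T(n+2) from seeds T(5),T(6),T(7) = 11,20,37
--     return ((t_n + t_n2 - 2) % q) // 2 % mod
-- ===== Notes on version B (the rewrite author's own statement) =====
-- stated objective: faster
-- what changed: Replaces A's 4x4 matrix exponentiation by Kitamasa-style binary exponentiation of a degree-two polynomial residue modulo the Tribonacci characteristic polynomial (nine multiplications per squaring step instead of up to 128, tuples instead of nested lists), combined with the closed-form identity expressing twice the partial sum through two Tribonacci values, evaluated modulo twice the modulus and halved exactly.
import Mathlib
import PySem

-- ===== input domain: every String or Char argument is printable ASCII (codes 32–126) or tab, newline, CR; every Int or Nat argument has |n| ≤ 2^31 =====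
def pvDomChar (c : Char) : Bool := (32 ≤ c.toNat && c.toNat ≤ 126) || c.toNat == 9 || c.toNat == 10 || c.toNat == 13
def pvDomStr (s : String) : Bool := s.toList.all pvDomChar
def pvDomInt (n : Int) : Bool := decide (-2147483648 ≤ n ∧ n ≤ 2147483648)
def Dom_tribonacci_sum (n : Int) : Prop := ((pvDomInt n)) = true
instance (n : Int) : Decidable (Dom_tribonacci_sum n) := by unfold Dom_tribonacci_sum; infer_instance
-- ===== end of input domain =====

-- B replaces A's 4x4 matrix exponentiation by binary exponentiation of a polynomial residue
-- modulo the Tribonacci characteristic polynomial, plus a closed-form identity that expresses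
-- twice the partial sum through two Tribonacci values, halved exactly modulo twice the modulus.

-- the module constant mod = int(1e15 + 7)
def pvMod : Int := 1000000000000007

-- ===== PORT A =====
-- matrix_mult: the assignments c[i][j] = (c[i][j] + a[i][k]*b[k][j]) % mod are transcribed as a
-- map over i, map over j, fold over k; indexing uses pyGetD with a default — exact here because in
-- every call A makes the matrices are square of size `len a`, so every index is in range.
def matrix_mult (a b : List (List Int)) : List (List Int) :=
  let size : Int := a.length
  (PySem.List.pyRange 0 size 1).map (fun i =>
    (PySem.List.pyRange 0 size 1).map (fun j =>
      (PySem.List.pyRange 0 size 1).foldl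
        (fun c k => PySem.Int.mod
          (c + PySem.List.pyGetD (PySem.List.pyGetD a i []) k 0 *
               PySem.List.pyGetD (PySem.List.pyGetD b k []) j 0) pvMod) 0))

-- the `while n > 0` loop of matrix_power
def matrix_power_loop (result matrix : List (List Int)) (n : Int) : List (List Int) :=
  if 0 < n then
    matrix_power_loop
      (if PySem.Int.mod n 2 = 1 then matrix_mult result matrix else result)
      (matrix_mult matrix matrix)
      (PySem.Int.floordiv n 2)
  else result
termination_by n.toNat
decreasing_by
  rw [PySem.Int.floordiv_eq_ediv_of_pos (by norm_num : (0:Int) < 2)]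
  omega

def matrix_power (matrix : List (List Int)) (n : Int) : List (List Int) :=
  let size : Int := matrix.length
  let result := (PySem.List.pyRange 0 size 1).map (fun i =>
    (PySem.List.pyRange 0 size 1).map (fun j => if i = j then (1:Int) else 0))
  matrix_power_loop result matrix n

def tribonacci_sum (n : Int) : Int :=
  if n = 1 then 1
  else if n = 2 then 2 + 1
  else if n = 3 then 3 + 2 + 1
  else
    let base : List (List Int) := [[1,1,1,0],[1,0,0,0],[0,1,0,0],[1,1,1,1]]
    let temp : List Int := [3,2,1,6]
    let result := matrix_power base (n - 3)
    PySem.Int.mod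
      ((PySem.List.pyRange 0 4 1).foldl
        (fun acc i => acc +
          PySem.List.pyGetD (PySem.List.pyGetD result 3 []) i 0 *
          PySem.List.pyGetD temp i 0) 0) pvMod

-- ===== PORT B =====
def pvQ : Int := 2 * pvMod

-- _polmul of Source B: product modulo x^3 - x^2 - x - 1, coefficients mod q = 2*mod
def polmul (u v : Int × Int × Int) : Int × Int × Int :=
  let w0 := u.1 * v.1
  let w1 := u.1 * v.2.1 + u.2.1 * v.1
  let w2 := u.1 * v.2.2 + u.2.1 * v.2.1 + u.2.2 * v.1
  let w3 := u.2.1 * v.2.2 + u.2.2 * v.2.1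
  let w4 := u.2.2 * v.2.2
  -- w3 += w4; w2 += w4; w1 += w4  (x^4 -> x^3 + x^2 + x)
  let w3' := w3 + w4
  let w2' := w2 + w4
  let w1' := w1 + w4
  -- w2 += w3; w1 += w3; w0 += w3  (x^3 -> x^2 + x + 1)
  let w2'' := w2' + w3'
  let w1'' := w1' + w3'
  let w0' := w0 + w3'
  (PySem.Int.mod w0' pvQ, PySem.Int.mod w1'' pvQ, PySem.Int.mod w2'' pvQ)

-- the `while e > 0` loop of Source B
def polpow_loop (r b : Int × Int × Int) (e : Int) : Int × Int × Int :=
  if 0 < e then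
    polpow_loop (if PySem.Int.mod e 2 = 1 then polmul r b else r) (polmul b b)
      (PySem.Int.floordiv e 2)
  else r
termination_by e.toNat
decreasing_by
  rw [PySem.Int.floordiv_eq_ediv_of_pos (by norm_num : (0:Int) < 2)]
  omega

def tribonacci_sum_alt (n : Int) : Int :=
  if n = 1 then 1
  else if n = 2 then 3
  else if n = 3 then 6
  else
    let r := polpow_loop (1,0,0) (0,1,0) (n - 3)
    let tn := PySem.Int.mod (3 * r.1 + 6 * r.2.1 + 11 * r.2.2) pvQ
    let tn2 := PySem.Int.mod (11 * r.1 + 20 * r.2.1 + 37 * r.2.2) pvQ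
    PySem.Int.mod (PySem.Int.floordiv (PySem.Int.mod (tn + tn2 - 2) pvQ) 2) pvMod

-- ===== PRECONDITION & SPEC =====
def Spec_tribonacci_sum (n : Int) (out : Int) : Prop := out = tribonacci_sum_alt n
instance (n : Int) (out : Int) : Decidable (Spec_tribonacci_sum n out) := by unfold Spec_tribonacci_sum; infer_instance

-- ===== CLAIM (what is proved, stated in full; the proofs are below) =====
def Claim_equal_tribonacci_sum : Prop := ∀ (n : Int), Dom_tribonacci_sum n → Spec_tribonacci_sum n (tribonacci_sum n)

-- ===== LEMMAS AND PROOFS =====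

-- the mathematical Tribonacci numbers (T 1 = 1, T 2 = 2, T 3 = 3, …) and their partial sums
def T : Nat → Int
  | 0 => 0
  | 1 => 1
  | 2 => 2
  | (k+3) => T (k+2) + T (k+1) + T k

def Ssum : Nat → Int
  | 0 => 0
  | (k+1) => Ssum k + T (k+1)

theorem T_step (k : Nat) : T (k + 4) = T (k + 3) + T (k + 2) + T (k + 1) := by
  show T ((k+1) + 3) = _
  rw [T]

theorem Ssum_step (k : Nat) : Ssum (k + 4) = Ssum (k + 3) + T (k + 4) := by
  show Ssum ((k+3) + 1) = _
  rw [Ssum]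

theorem pvMod_pos : (0:Int) < pvMod := by norm_num [pvMod]

theorem mod_is_emod (a : Int) : PySem.Int.mod a pvMod = a % pvMod :=
  PySem.Int.mod_eq_emod_of_pos pvMod_pos

theorem modSelf (a p : Int) : a % p ≡ a [ZMOD p] := Int.emod_emod_of_dvd a dvd_rfl

-- A-side machinery: entry extraction, congruence with 4x4 integer matrices
theorem pr4 : PySem.List.pyRange 0 4 1 = [0,1,2,3] := by decide

def ent (L : List (List Int)) (i j : Int) : Int :=
  PySem.List.pyGetD (PySem.List.pyGetD L i []) j 0

def Cong (L : List (List Int)) (A : Matrix (Fin 4) (Fin 4) Int) : Prop :=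
  L.length = 4 ∧ ∀ i j : Fin 4, ent L ((i:Nat):Int) ((j:Nat):Int) ≡ A i j [ZMOD pvMod]

theorem mm_length (a b : List (List Int)) (h : a.length = 4) : (matrix_mult a b).length = 4 := by
  simp [matrix_mult, h, PySem.List.length_pyRange_one]

theorem ent_mm (a b : List (List Int)) (h : a.length = 4) (i j : Nat) (hi : i < 4) (hj : j < 4) :
    ent (matrix_mult a b) ((i:Nat):Int) ((j:Nat):Int) =
      PySem.Int.mod (PySem.Int.mod (PySem.Int.mod (PySem.Int.mod
        (0 + ent a i 0 * ent b 0 j) pvMod + ent a i 1 * ent b 1 j) pvMod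
        + ent a i 2 * ent b 2 j) pvMod + ent a i 3 * ent b 3 j) pvMod := by
  unfold matrix_mult ent
  rw [h]
  rw [PySem.List.pyGetD_map_pyRange _ 4 i [] hi]
  rw [PySem.List.pyGetD_map_pyRange _ 4 j 0 hj]
  rw [show ((4:Nat):Int) = (4:Int) by norm_num, pr4]
  simp [List.foldl]

theorem fold4_cong (x0 x1 x2 x3 y0 y1 y2 y3 : Int)
    (h0 : x0 ≡ y0 [ZMOD pvMod]) (h1 : x1 ≡ y1 [ZMOD pvMod])
    (h2 : x2 ≡ y2 [ZMOD pvMod]) (h3 : x3 ≡ y3 [ZMOD pvMod]) :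
    PySem.Int.mod (PySem.Int.mod (PySem.Int.mod (PySem.Int.mod
      (0 + x0) pvMod + x1) pvMod + x2) pvMod + x3) pvMod ≡ y0 + y1 + y2 + y3 [ZMOD pvMod] := by
  simp only [mod_is_emod, zero_add]
  have s1 : (x0 % pvMod + x1) ≡ y0 + y1 [ZMOD pvMod] := ((modSelf x0 pvMod).trans h0).add h1
  have s2 : ((x0 % pvMod + x1) % pvMod + x2) ≡ y0 + y1 + y2 [ZMOD pvMod] :=
    ((modSelf _ pvMod).trans s1).add h2
  have s3 : (((x0 % pvMod + x1) % pvMod + x2) % pvMod + x3) ≡ y0 + y1 + y2 + y3 [ZMOD pvMod] :=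
    ((modSelf _ pvMod).trans s2).add h3
  exact (modSelf _ pvMod).trans s3

theorem Cong_mul {a b : List (List Int)} {A B : Matrix (Fin 4) (Fin 4) Int}
    (ha : Cong a A) (hb : Cong b B) : Cong (matrix_mult a b) (A * B) := by
  refine ⟨mm_length a b ha.1, fun i j => ?_⟩
  rw [ent_mm a b ha.1 i j i.isLt j.isLt]
  have hm : (A * B) i j = A i 0 * B 0 j + A i 1 * B 1 j + A i 2 * B 2 j + A i 3 * B 3 j := by
    simp [Matrix.mul_apply, Fin.sum_univ_four]
  rw [hm]
  have e : ∀ (k : Fin 4), ent a ((i:Nat):Int) ((k:Nat):Int) * ent b ((k:Nat):Int) ((j:Nat):Int)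
      ≡ A i k * B k j [ZMOD pvMod] := fun k => (ha.2 i k).mul (hb.2 k j)
  have e0 := e 0; have e1 := e 1; have e2 := e 2; have e3 := e 3
  norm_num at e0 e1 e2 e3
  exact fold4_cong _ _ _ _ _ _ _ _ e0 e1 e2 e3

theorem powLoop_cong (k : Nat) : ∀ (nn : Int) (r m : List (List Int))
    (R M : Matrix (Fin 4) (Fin 4) Int), nn.toNat = k → Cong r R → Cong m M →
    Cong (matrix_power_loop r m nn) (R * M ^ k) := by
  induction k using Nat.strong_induction_on with
  | _ k ih =>
    intro nn r m R M hk hr hm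
    rw [matrix_power_loop]
    by_cases hpos : 0 < nn
    · rw [if_pos hpos]
      have hfd : PySem.Int.floordiv nn 2 = nn / 2 :=
        PySem.Int.floordiv_eq_ediv_of_pos (by norm_num)
      have hk2 : (PySem.Int.floordiv nn 2).toNat = k / 2 := by rw [hfd]; omega
      have hklt : k / 2 < k := by omega
      have hmm : Cong (matrix_mult m m) (M * M) := Cong_mul hm hm
      have hmod : PySem.Int.mod nn 2 = nn % 2 :=
        PySem.Int.mod_eq_emod_of_pos (by norm_num)
      by_cases hodd : PySem.Int.mod nn 2 = 1
      · rw [if_pos hodd]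
        have := ih (k / 2) hklt _ _ _ (R * M) (M * M) hk2 (Cong_mul hr hm) hmm
        have hke : k = 2 * (k / 2) + 1 := by
          rw [hmod] at hodd; omega
        have heq : R * M * (M * M) ^ (k / 2) = R * M ^ k := by
          conv_rhs => rw [hke]
          rw [pow_succ', pow_mul, ← sq, mul_assoc]
        rwa [heq] at this
      · rw [if_neg hodd]
        have := ih (k / 2) hklt _ _ _ R (M * M) hk2 hr hmm
        have hke : k = 2 * (k / 2) := by
          rw [hmod] at hodd; omega
        have heq : R * (M * M) ^ (k / 2) = R * M ^ k := by
          conv_rhs => rw [hke]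
          rw [pow_mul, ← sq]
        rwa [heq] at this
    · rw [if_neg hpos]
      have : k = 0 := by omega
      simpa [this] using hr

def Mmat : Matrix (Fin 4) (Fin 4) Int := !![1,1,1,0; 1,0,0,0; 0,1,0,0; 1,1,1,1]
def v0 : Fin 4 → Int := ![3,2,1,6]
def pvBase : List (List Int) := [[1,1,1,0],[1,0,0,0],[0,1,0,0],[1,1,1,1]]
def pvId4 : List (List Int) := [[1,0,0,0],[0,1,0,0],[0,0,1,0],[0,0,0,1]]

theorem Cong_id4 : Cong pvId4 (1 : Matrix (Fin 4) (Fin 4) Int) := by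
  constructor
  · rfl
  · decide

theorem Cong_base : Cong pvBase Mmat := by
  constructor
  · rfl
  · decide

theorem matrix_power_base (nn : Int) :
    matrix_power pvBase nn = matrix_power_loop pvId4 pvBase nn := by
  unfold matrix_power
  norm_num [pvBase, pr4, pvId4, List.map]

theorem mulVec_pow (m : Nat) :
    (Mmat ^ m).mulVec v0 = ![T (m+3), T (m+2), T (m+1), Ssum (m+3)] := by
  induction m with
  | zero =>
    rw [pow_zero, Matrix.one_mulVec]
    funext i; fin_cases i <;> simp [v0] <;> decide
  | succ m ih =>
    rw [pow_succ', ← Matrix.mulVec_mulVec, ih]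
    funext i
    fin_cases i <;>
      simp [Mmat, Matrix.mulVec, dotProduct, Fin.sum_univ_four,
            show m+1+3 = m+4 from rfl, show m+1+2 = m+3 from rfl, show m+1+1 = m+2 from rfl,
            T_step, Ssum_step] <;> ring

theorem A_ge4 (n : Int) (h : 4 ≤ n) : tribonacci_sum n = Ssum n.toNat % pvMod := by
  unfold tribonacci_sum
  rw [if_neg (by omega : ¬ n = 1), if_neg (by omega : ¬ n = 2), if_neg (by omega : ¬ n = 3)]
  have hc : Cong (matrix_power pvBase (n-3)) (Mmat ^ (n-3).toNat) := by
    rw [matrix_power_base]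
    have := powLoop_cong (n-3).toNat (n-3) pvId4 pvBase 1 Mmat rfl Cong_id4 Cong_base
    rwa [one_mul] at this
  rw [pr4]
  simp only [List.foldl]
  have e : ∀ (k : Fin 4), ent (matrix_power pvBase (n-3)) 3 ((k:Nat):Int)
      ≡ (Mmat ^ (n-3).toNat) 3 k [ZMOD pvMod] := by
    intro k
    have := hc.2 3 k
    norm_num at this ⊢
    exact this
  have e0 := e 0; have e1 := e 1; have e2 := e 2; have e3 := e 3
  norm_num at e0 e1 e2 e3
  have hX : (0 + ent (matrix_power pvBase (n-3)) 3 0 * 3 + ent (matrix_power pvBase (n-3)) 3 1 * 2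
      + ent (matrix_power pvBase (n-3)) 3 2 * 1 + ent (matrix_power pvBase (n-3)) 3 3 * 6)
      ≡ Ssum n.toNat [ZMOD pvMod] := by
    have hv : (Mmat ^ (n-3).toNat) 3 0 * 3 + (Mmat ^ (n-3).toNat) 3 1 * 2
        + (Mmat ^ (n-3).toNat) 3 2 * 1 + (Mmat ^ (n-3).toNat) 3 3 * 6 = Ssum n.toNat := by
      have := congrFun (mulVec_pow (n-3).toNat) 3
      simp [Matrix.mulVec, dotProduct, Fin.sum_univ_four, v0] at this
      rw [show (n-3).toNat + 3 = n.toNat by omega] at this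
      linarith [this]
    calc (0 + ent (matrix_power pvBase (n-3)) 3 0 * 3 + ent (matrix_power pvBase (n-3)) 3 1 * 2
        + ent (matrix_power pvBase (n-3)) 3 2 * 1 + ent (matrix_power pvBase (n-3)) 3 3 * 6)
        ≡ 0 + (Mmat ^ (n-3).toNat) 3 0 * 3 + (Mmat ^ (n-3).toNat) 3 1 * 2
        + (Mmat ^ (n-3).toNat) 3 2 * 1 + (Mmat ^ (n-3).toNat) 3 3 * 6 [ZMOD pvMod] := by
          exact ((((Int.ModEq.refl 0).add (e0.mul_right 3)).add (e1.mul_right 2)).add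
            (e2.mul_right 1)).add (e3.mul_right 6)
      _ = Ssum n.toNat := by rw [zero_add]; exact hv
  show PySem.Int.mod _ pvMod = _
  rw [mod_is_emod]
  have l0 : PySem.List.pyGetD ([3,2,1,6]:List Int) 0 0 = 3 := by decide
  have l1 : PySem.List.pyGetD ([3,2,1,6]:List Int) 1 0 = 2 := by decide
  have l2 : PySem.List.pyGetD ([3,2,1,6]:List Int) 2 0 = 1 := by decide
  have l3 : PySem.List.pyGetD ([3,2,1,6]:List Int) 3 0 = 6 := by decide
  rw [l0, l1, l2, l3]
  simp only [ent] at hX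
  exact hX

theorem A_le0 (n : Int) (h : n ≤ 0) : tribonacci_sum n = 6 := by
  unfold tribonacci_sum
  rw [if_neg (by omega : ¬ n = 1), if_neg (by omega : ¬ n = 2), if_neg (by omega : ¬ n = 3)]
  show PySem.Int.mod
      ((PySem.List.pyRange 0 4 1).foldl
        (fun acc i => acc + PySem.List.pyGetD (PySem.List.pyGetD (matrix_power pvBase (n-3)) 3 []) i 0 *
          PySem.List.pyGetD [3,2,1,6] i 0) 0) pvMod = 6
  rw [matrix_power_base, matrix_power_loop, if_neg (by omega : ¬ (0:Int) < n - 3)]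
  decide

-- B-side machinery: a triple (a,b,c) "represents" x^e modulo x^3-x^2-x-1 when its action on the
-- Tribonacci sequence is a shift by e, coefficientwise mod q = 2*mod
def RepB (u : Int × Int × Int) (e : Nat) : Prop :=
  ∀ k : Nat, u.1 * T k + u.2.1 * T (k+1) + u.2.2 * T (k+2) ≡ T (k+e) [ZMOD pvQ]

theorem pvQ_pos : (0:Int) < pvQ := by norm_num [pvQ, pvMod]

theorem mod_is_emod_q (a : Int) : PySem.Int.mod a pvQ = a % pvQ :=
  PySem.Int.mod_eq_emod_of_pos pvQ_pos

theorem T_eq3 (k : Nat) : T (k+3) = T (k+2) + T (k+1) + T k := by rw [T]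

theorem RepB_one : RepB (1,0,0) 0 := by
  intro k; simpa using Int.ModEq.refl (T k)

theorem RepB_x : RepB (0,1,0) 1 := by
  intro k; simpa using Int.ModEq.refl (T (k+1))

theorem RepB_mul {u v : Int × Int × Int} {e f : Nat}
    (hu : RepB u e) (hv : RepB v f) : RepB (polmul u v) (e + f) := by
  obtain ⟨u0, u1, u2⟩ := u
  obtain ⟨v0, v1, v2⟩ := v
  intro k
  show (PySem.Int.mod _ pvQ) * T k + (PySem.Int.mod _ pvQ) * T (k+1)
      + (PySem.Int.mod _ pvQ) * T (k+2) ≡ T (k+(e+f)) [ZMOD pvQ]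
  simp only [mod_is_emod_q]
  refine Int.ModEq.trans
    ((((modSelf _ pvQ).mul_right (T k)).add ((modSelf _ pvQ).mul_right (T (k+1)))).add
      ((modSelf _ pvQ).mul_right (T (k+2)))) ?_
  have hexp :
      (u0 * v0 + (u1 * v2 + u2 * v1 + u2 * v2)) * T k
      + (u0 * v1 + u1 * v0 + u2 * v2 + (u1 * v2 + u2 * v1 + u2 * v2)) * T (k+1)
      + (u0 * v2 + u1 * v1 + u2 * v0 + u2 * v2 + (u1 * v2 + u2 * v1 + u2 * v2)) * T (k+2)
      = v0 * (u0 * T k + u1 * T (k+1) + u2 * T (k+2))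
      + v1 * (u0 * T (k+1) + u1 * T (k+2) + u2 * T (k+3))
      + v2 * (u0 * T (k+2) + u1 * T (k+3) + u2 * T (k+4)) := by
    rw [T_step k, T_eq3 k]; ring
  rw [hexp]
  have h0 := (hu k).mul_left v0
  have h1 := (hu (k+1)).mul_left v1
  have h2 := (hu (k+2)).mul_left v2
  rw [show k+1+e = k+e+1 by omega] at h1
  rw [show k+2+e = k+e+2 by omega] at h2
  refine Int.ModEq.trans ((h0.add h1).add h2) ?_
  have := hv (k+e)
  rw [show k+e+f = k+(e+f) by omega] at this
  exact this

theorem polpow_cong (kk : Nat) : ∀ (e : Int) (r b : Int × Int × Int) (a bb : Nat),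
    e.toNat = kk → RepB r a → RepB b bb → RepB (polpow_loop r b e) (a + bb * kk) := by
  induction kk using Nat.strong_induction_on with
  | _ kk ih =>
    intro e r b a bb hk hr hb
    rw [polpow_loop]
    by_cases hpos : 0 < e
    · rw [if_pos hpos]
      have hfd : PySem.Int.floordiv e 2 = e / 2 :=
        PySem.Int.floordiv_eq_ediv_of_pos (by norm_num)
      have hk2 : (PySem.Int.floordiv e 2).toNat = kk / 2 := by rw [hfd]; omega
      have hklt : kk / 2 < kk := by omega
      have hmod : PySem.Int.mod e 2 = e % 2 :=
        PySem.Int.mod_eq_emod_of_pos (by norm_num)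
      by_cases hodd : PySem.Int.mod e 2 = 1
      · rw [if_pos hodd]
        have hko : kk % 2 = 1 := by rw [hmod] at hodd; omega
        have := ih (kk / 2) hklt _ _ _ (a + bb) (bb + bb) hk2 (RepB_mul hr hb) (RepB_mul hb hb)
        obtain ⟨j, hj⟩ : ∃ j, kk = 2 * j + 1 := ⟨kk / 2, by omega⟩
        subst hj
        rwa [show a + bb + (bb + bb) * ((2 * j + 1) / 2) = a + bb * (2 * j + 1) from by
          rw [show (2 * j + 1) / 2 = j from by omega]; ring] at this
      · rw [if_neg hodd]
        have hke : kk % 2 = 0 := by rw [hmod] at hodd; omega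
        have := ih (kk / 2) hklt _ _ _ a (bb + bb) hk2 hr (RepB_mul hb hb)
        obtain ⟨j, hj⟩ : ∃ j, kk = 2 * j := ⟨kk / 2, by omega⟩
        subst hj
        rwa [show a + (bb + bb) * (2 * j / 2) = a + bb * (2 * j) from by
          rw [show 2 * j / 2 = j from by omega]; ring] at this
    · rw [if_neg hpos]
      have : kk = 0 := by omega
      simpa [this] using hr

theorem two_Ssum (n : Nat) : 2 * Ssum n = T (n+2) + T n - 2 := by
  induction n with
  | zero => decide
  | succ n ih =>
    rw [Ssum]
    have h3 := T_eq3 n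
    have : T (n+1+2) = T (n+2) + T (n+1) + T n := h3
    omega

theorem B_ge4 (n : Int) (h : 4 ≤ n) : tribonacci_sum_alt n = Ssum n.toNat % pvMod := by
  unfold tribonacci_sum_alt
  rw [if_neg (by omega : ¬ n = 1), if_neg (by omega : ¬ n = 2), if_neg (by omega : ¬ n = 3)]
  have hrep : RepB (polpow_loop (1,0,0) (0,1,0) (n-3)) (n-3).toNat := by
    have := polpow_cong (n-3).toNat (n-3) (1,0,0) (0,1,0) 0 1 rfl RepB_one RepB_x
    simpa using this
  set u := polpow_loop (1,0,0) (0,1,0) (n-3) with hu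
  set nn := n.toNat with hnn
  have htn : (3 * u.1 + 6 * u.2.1 + 11 * u.2.2) ≡ T nn [ZMOD pvQ] := by
    have h3 := hrep 3
    rw [show (3:Nat) + (n-3).toNat = nn by omega] at h3
    calc (3 * u.1 + 6 * u.2.1 + 11 * u.2.2)
        = u.1 * T 3 + u.2.1 * T 4 + u.2.2 * T 5 := by
          rw [show T 3 = 3 from by decide, show T 4 = 6 from by decide,
              show T 5 = 11 from by decide]
          ring
      _ ≡ T nn [ZMOD pvQ] := h3
  have htn2 : (11 * u.1 + 20 * u.2.1 + 37 * u.2.2) ≡ T (nn+2) [ZMOD pvQ] := by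
    have h5 := hrep 5
    rw [show (5:Nat) + (n-3).toNat = nn + 2 by omega] at h5
    calc (11 * u.1 + 20 * u.2.1 + 37 * u.2.2)
        = u.1 * T 5 + u.2.1 * T 6 + u.2.2 * T 7 := by
          rw [show T 5 = 11 from by decide, show T 6 = 20 from by decide,
              show T 7 = 37 from by decide]
          ring
      _ ≡ T (nn+2) [ZMOD pvQ] := h5
  have hX : PySem.Int.mod (PySem.Int.mod (3 * u.1 + 6 * u.2.1 + 11 * u.2.2) pvQ
      + PySem.Int.mod (11 * u.1 + 20 * u.2.1 + 37 * u.2.2) pvQ - 2) pvQ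
      ≡ 2 * Ssum nn [ZMOD pvQ] := by
    simp only [mod_is_emod_q]
    refine (modSelf _ pvQ).trans ?_
    have := (((modSelf _ pvQ).trans htn).add ((modSelf _ pvQ).trans htn2)).sub_right 2
    refine this.trans ?_
    rw [show T nn + T (nn+2) - 2 = 2 * Ssum nn from by have := two_Ssum nn; omega]
  set X := PySem.Int.mod (PySem.Int.mod (3 * u.1 + 6 * u.2.1 + 11 * u.2.2) pvQ
      + PySem.Int.mod (11 * u.1 + 20 * u.2.1 + 37 * u.2.2) pvQ - 2) pvQ with hXdef
  obtain ⟨t, ht⟩ : ∃ t : Int, X = 2 * Ssum nn + pvQ * t := by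
    obtain ⟨t, ht⟩ := (Int.ModEq.dvd hX)
    exact ⟨-t, by rw [mul_neg]; omega⟩
  show PySem.Int.mod (PySem.Int.floordiv X 2) pvMod = Ssum nn % pvMod
  rw [mod_is_emod, PySem.Int.floordiv_eq_ediv_of_pos (by norm_num : (0:Int) < 2)]
  have hhalf : X / 2 = Ssum nn + pvMod * t := by
    rw [show X = 2 * (Ssum nn + pvMod * t) from by rw [ht]; simp [pvQ]; ring]
    omega
  rw [hhalf, Int.add_mul_emod_self_left]

theorem B_le0 (n : Int) (h : n ≤ 0) : tribonacci_sum_alt n = 6 := by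
  unfold tribonacci_sum_alt
  rw [if_neg (by omega : ¬ n = 1), if_neg (by omega : ¬ n = 2), if_neg (by omega : ¬ n = 3)]
  show PySem.Int.mod (PySem.Int.floordiv (PySem.Int.mod
      (PySem.Int.mod (3 * (polpow_loop (1,0,0) (0,1,0) (n-3)).1
        + 6 * (polpow_loop (1,0,0) (0,1,0) (n-3)).2.1
        + 11 * (polpow_loop (1,0,0) (0,1,0) (n-3)).2.2) pvQ
      + PySem.Int.mod (11 * (polpow_loop (1,0,0) (0,1,0) (n-3)).1
        + 20 * (polpow_loop (1,0,0) (0,1,0) (n-3)).2.1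
        + 37 * (polpow_loop (1,0,0) (0,1,0) (n-3)).2.2) pvQ - 2) pvQ) 2) pvMod = 6
  rw [polpow_loop, if_neg (by omega : ¬ (0:Int) < n - 3)]
  decide

-- ===== VERDICT (by name: the statement is the Claim_ definition above) =====
theorem tribonacci_sum_spec : Claim_equal_tribonacci_sum := by
  intro n _
  show tribonacci_sum n = tribonacci_sum_alt n
  by_cases h0 : n ≤ 0
  · rw [A_le0 n h0, B_le0 n h0]
  · by_cases h4 : 4 ≤ n
    · rw [A_ge4 n h4, B_ge4 n h4]
    · have : n = 1 ∨ n = 2 ∨ n = 3 := by omega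
      rcases this with h | h | h <;> subst h <;> decide
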